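-- pv_equiv track=rewrite | github.com/nabelly19/algorithm-complexity-combination | script.py | filtro_estatistico
-- ===== SOURCE A (Python) =====
-- def bitmap_para_tupla(bitmap):
--     return tuple(i + 1 for i in range(25) if (bitmap >> i) & 1)
--
-- def filtro_estatistico(combinacoes):
--     filtradas = []
--     for c in combinacoes:
--         nums = bitmap_para_tupla(c)
--         sequencial = all(nums[i] + 1 == nums[i + 1] for i in range(len(nums) - 1))
--         if not sequencial:
--             filtradas.append(c)
--     return filtradas
-- ===== SOURCE B (Python) =====
-- def _nao_sequencial(c):
--     # keep c iff its low-25-bit set is NOT a single contiguous run (empty/singleton count as runs)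
--     m = c & 0x1FFFFFF
--     while m and not (m & 1):
--         m >>= 1
--     return m & (m + 1) != 0
--
-- def filtro_estatistico(combinacoes):
--     return [c for c in combinacoes if _nao_sequencial(c)]
-- ===== Notes on version B (the rewrite author's own statement) =====
-- stated objective: faster
-- what changed: A rebuilds the tuple of set-bit positions (a 25-step generator) per bitmap and scans it pairwise for consecutiveness; B tests contiguity directly on the integer with bit tricks: mask to 25 bits, strip trailing zero bits, and check m & (m+1) == 0 (all-ones).
import Mathlib
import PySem

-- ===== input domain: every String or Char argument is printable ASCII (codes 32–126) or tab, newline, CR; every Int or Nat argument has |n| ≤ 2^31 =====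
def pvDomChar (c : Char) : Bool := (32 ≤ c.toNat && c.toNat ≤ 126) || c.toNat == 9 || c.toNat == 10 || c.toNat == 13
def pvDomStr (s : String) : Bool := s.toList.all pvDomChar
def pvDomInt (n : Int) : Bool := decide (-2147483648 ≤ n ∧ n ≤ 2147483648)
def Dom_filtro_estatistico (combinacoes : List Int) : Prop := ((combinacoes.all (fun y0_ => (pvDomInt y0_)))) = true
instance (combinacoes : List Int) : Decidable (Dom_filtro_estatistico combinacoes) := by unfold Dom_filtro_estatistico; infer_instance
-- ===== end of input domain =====

-- B replaces A's per-bitmap "build the tuple of set bits and scan it for consecutiveness"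
-- with a direct bit trick (mask to 25 bits, strip trailing zero bits, test all-ones);
-- equal return value on every input (both functions are total).

-- ===== PORT A =====
-- `(bitmap >> i) & 1` is Python-exact as `PySem.Int.band (bitmap >>> i.toNat) 1`
-- (i ranges over 0..24, so `i.toNat` is exact); a generator condition is true iff the value ≠ 0.
def bitmap_para_tupla (bitmap : Int) : List Int :=
  ((PySem.List.pyRange 0 25 1).filter
      (fun i => PySem.Int.band (bitmap >>> i.toNat) 1 != 0)).map (fun i => i + 1)

-- `nums[i]` / `nums[i+1]` are always in range here (0 ≤ i < len(nums)-1), so pyGetD _ _ 0 is exact.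
def filtro_estatistico (combinacoes : List Int) : List Int :=
  combinacoes.foldl (fun filtradas c =>
    let nums := bitmap_para_tupla c
    let sequencial := (PySem.List.pyRange 0 ((nums.length : Int) - 1) 1).all
        (fun i => PySem.List.pyGetD nums i 0 + 1 == PySem.List.pyGetD nums (i + 1) 0)
    if !sequencial then filtradas ++ [c] else filtradas) []

-- ===== PORT B =====
-- `while m and not (m & 1): m >>= 1` — strip trailing zero bits (terminates: m strictly decreases).
def stripTrailingZeros (m : Nat) : Nat :=
  if m ≠ 0 ∧ m % 2 = 0 then stripTrailingZeros (m / 2) else m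
  termination_by m
  decreasing_by omega

-- `c & 0x1FFFFFF` is `PySem.Int.band c 33554431`, a value in [0, 2^25), so `.toNat` is exact.
def nao_sequencial (c : Int) : Bool :=
  let m := (PySem.Int.band c 33554431).toNat
  let m' := stripTrailingZeros m
  (m' &&& (m' + 1)) != 0

def filtro_estatistico_alt (combinacoes : List Int) : List Int :=
  combinacoes.filter nao_sequencial

-- ===== PRECONDITION & SPEC =====
def Spec_filtro_estatistico (combinacoes : List Int) (out : List Int) : Prop := out = filtro_estatistico_alt combinacoes
instance (combinacoes : List Int) (out : List Int) : Decidable (Spec_filtro_estatistico combinacoes out) := by unfold Spec_filtro_estatistico; infer_instance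

-- ===== CLAIM (what is proved, stated in full; the proofs are below) =====
def Claim_equal_filtro_estatistico : Prop := ∀ (combinacoes : List Int), Dom_filtro_estatistico combinacoes → Spec_filtro_estatistico combinacoes (filtro_estatistico combinacoes)

-- ===== LEMMAS AND PROOFS =====

-- The ascending list of set-bit indices of m below n.
def setBits (n m : Nat) : List Nat := (List.range n).filter m.testBit

theorem stripTZ_zero : stripTrailingZeros 0 = 0 := by
  rw [stripTrailingZeros]; simp

theorem stripTZ_even {m : Nat} (h0 : m ≠ 0) (h2 : m % 2 = 0) :
    stripTrailingZeros m = stripTrailingZeros (m / 2) := by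
  rw [stripTrailingZeros]; simp [h0, h2]

theorem stripTZ_odd {m : Nat} (h2 : m % 2 = 1) : stripTrailingZeros m = m := by
  rw [stripTrailingZeros]; simp [h2]

theorem land_odd_succ (q : Nat) : (2 * q + 1) &&& (2 * q + 2) = 2 * (q &&& (q + 1)) := by
  apply Nat.eq_of_testBit_eq
  intro i
  cases i with
  | zero =>
      simp only [Nat.testBit_zero]
      have h1 : (2 * q + 1) % 2 = 1 := by omega
      have h2 : (2 * q + 2) % 2 = 0 := by omega
      have h3 : 2 * (q &&& (q + 1)) % 2 = 0 := by omega
      simp [h1, h2, h3]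
  | succ j =>
      rw [Nat.testBit_and]
      simp only [Nat.testBit_succ]
      have h1 : (2 * q + 1) / 2 = q := by omega
      have h2 : (2 * q + 2) / 2 = q + 1 := by omega
      have h3 : 2 * (q &&& (q + 1)) / 2 = q &&& (q + 1) := by omega
      rw [h1, h2, h3, Nat.testBit_and]

theorem land_even_succ (r : Nat) : (2 * r) &&& (2 * r + 1) = 2 * r := by
  apply Nat.eq_of_testBit_eq
  intro i
  cases i with
  | zero =>
      simp only [Nat.testBit_zero]
      have h1 : (2 * r) % 2 = 0 := by omega
      simp [h1]
  | succ j =>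
      rw [Nat.testBit_and]
      simp only [Nat.testBit_succ]
      have h1 : (2 * r) / 2 = r := by omega
      have h2 : (2 * r + 1) / 2 = r := by omega
      rw [h1, h2, Bool.and_self]

theorem setBits_zero_right (n : Nat) : setBits n 0 = [] := by
  simp [setBits, Nat.zero_testBit]

theorem setBits_succ (n m : Nat) :
    setBits (n + 1) m =
      (if m % 2 = 1 then [0] else []) ++ (setBits n (m / 2)).map (· + 1) := by
  unfold setBits
  rw [List.range_succ_eq_map, List.filter_cons, List.filter_map]
  have h : (m.testBit ∘ Nat.succ) = fun j => (m / 2).testBit j := by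
    funext j; simp [Function.comp, Nat.testBit_succ]
  rw [h]
  have h0 : m.testBit 0 = decide (m % 2 = 1) := Nat.testBit_zero m
  by_cases hm : m % 2 = 1 <;> simp [h0, hm]

theorem setBits_ne_nil {n m : Nat} (h0 : m ≠ 0) (h : m < 2 ^ n) : setBits n m ≠ [] := by
  induction n generalizing m with
  | zero => omega
  | succ k ih =>
      rw [setBits_succ]
      by_cases hm : m % 2 = 1
      · simp [hm]
      · have hq0 : m / 2 ≠ 0 := by omega
        have hql : m / 2 < 2 ^ k := by
          have := Nat.pow_succ 2 k
          omega
        have := ih hq0 hql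
        simp [hm]
        intro hc
        exact this hc

-- Core: the set bits of m (all below n) are consecutive iff stripping trailing zeros leaves all-ones.
theorem chain_setBits_iff {n m : Nat} (h : m < 2 ^ n) :
    (List.IsChain (fun a b : Nat => a + 1 = b) (setBits n m)) ↔
      (stripTrailingZeros m &&& (stripTrailingZeros m + 1) = 0) := by
  induction n generalizing m with
  | zero =>
      have : m = 0 := by omega
      subst this
      simp [setBits, stripTZ_zero]
  | succ k ih =>
      by_cases hm0 : m = 0
      · subst hm0
        simp [setBits_zero_right, stripTZ_zero]
      rcases Nat.even_or_odd m with he | ho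
      · -- m even, m ≠ 0
        have h2 : m % 2 = 0 := Nat.even_iff.mp he
        have hdec : setBits (k + 1) m = (setBits k (m / 2)).map (· + 1) := by
          rw [setBits_succ]; simp [h2]
        have hlt : m / 2 < 2 ^ k := by have := Nat.pow_succ 2 k; omega
        rw [hdec, stripTZ_even hm0 h2, List.isChain_map]
        have : (fun a b : Nat => a + 1 + 1 = b + 1) = (fun a b : Nat => a + 1 = b) := by
          funext a b; simp
        rw [this]
        exact ih hlt
      · -- m odd
        obtain ⟨q, rfl⟩ : ∃ q, m = 2 * q + 1 := ⟨m / 2, by have := Nat.odd_iff.mp ho; omega⟩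
        have h2 : (2 * q + 1) % 2 = 1 := by omega
        have hqd : (2 * q + 1) / 2 = q := by omega
        have hdec : setBits (k + 1) (2 * q + 1) = 0 :: (setBits k q).map (· + 1) := by
          rw [setBits_succ]; simp [h2, hqd]
        have hrhs : ((2 * q + 1) &&& (2 * q + 1 + 1) = 0) ↔ (q &&& (q + 1) = 0) := by
          have he : 2 * q + 1 + 1 = 2 * q + 2 := by omega
          rw [he, land_odd_succ]
          omega
        rw [hdec, stripTZ_odd h2, hrhs, List.isChain_cons, List.isChain_map]
        have hrel : (fun a b : Nat => a + 1 + 1 = b + 1) = (fun a b : Nat => a + 1 = b) := by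
          funext a b; simp
        rw [hrel]
        have hqlt : q < 2 ^ k := by have := Nat.pow_succ 2 k; omega
        by_cases hq0 : q = 0
        · subst hq0
          simp [setBits_zero_right]
        rcases Nat.even_or_odd q with hqe | hqo
        · -- q even > 0 : both sides false
          have hq2 : q % 2 = 0 := Nat.even_iff.mp hqe
          have hne := setBits_ne_nil hq0 hqlt
          constructor
          · rintro ⟨hhead, -⟩
            exfalso
            obtain ⟨k', rfl⟩ : ∃ k', k = k' + 1 := by
              refine ⟨k - 1, ?_⟩
              rcases Nat.eq_zero_or_pos k with rfl | hkpos
              · have : q < 1 := by simpa using hqlt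
                omega
              · omega
            have hdq : setBits (k' + 1) q = (setBits k' (q / 2)).map (· + 1) := by
              rw [setBits_succ]; simp [hq2]
            rcases hy : setBits k' (q / 2) with _ | ⟨b, t'⟩
            · rw [hdq, hy] at hne; simp at hne
            · have := hhead (b + 1 + 1) (by rw [hdq, hy]; simp)
              omega
          · intro hc
            exfalso
            obtain ⟨r, rfl⟩ : ∃ r, q = 2 * r := ⟨q / 2, by omega⟩
            rw [land_even_succ] at hc
            omega
        · -- q odd : head of setBits k q is 0
          have hq2 : q % 2 = 1 := Nat.odd_iff.mp hqo
          obtain ⟨k', rfl⟩ : ∃ k', k = k' + 1 := by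
            refine ⟨k - 1, ?_⟩
            rcases Nat.eq_zero_or_pos k with rfl | hkpos
            · have : q < 1 := by simpa using hqlt
              omega
            · omega
          have hdq : setBits (k' + 1) q = 0 :: (setBits k' (q / 2)).map (· + 1) := by
            rw [setBits_succ]; simp [hq2]
          have hih := ih (m := q) hqlt
          rw [stripTZ_odd hq2] at hih
          rw [← hih]
          constructor
          · rintro ⟨-, hc⟩; exact hc
          · intro hc
            refine ⟨?_, hc⟩
            intro y hy
            rw [hdq] at hy
            simp at hy
            omega

-- masking with 2^25-1 is mod 2^25 (Nat).
theorem and_mask25 (a : Nat) : a &&& 33554431 = a % 33554432 := by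
  have := Nat.and_two_pow_sub_one_eq_mod a 25
  norm_num at this
  exact this

-- Python's `c & 0x1FFFFFF` is `c mod 2^25` (Int emod).
theorem band_mask_eq (c : Int) : PySem.Int.band c 33554431 = c % 33554432 := by
  unfold PySem.Int.band
  have hb : (0 : Int) ≤ 33554431 := by norm_num
  have ht : (33554431 : Int).toNat = 33554431 := rfl
  by_cases hc : 0 ≤ c
  · rw [if_pos hc, if_pos hb, ht]
    rw [and_mask25]
    omega
  · rw [if_neg hc, if_pos hb, ht]
    rw [Nat.land_comm, and_mask25]
    omega

-- Bit k of c (k < 25) read the way A reads it equals bit k of c's low 25 bits.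
theorem bit_read_eq (c : Int) (k : Nat) (hk : k < 25) :
    (PySem.Int.band (c >>> k) 1 != 0) = ((c % 33554432).toNat.testBit k) := by
  rw [PySem.Int.band_one, PySem.Int.mod_eq_emod_of_pos (by norm_num), Int.shiftRight_eq_div_pow]
  have hcast : ((2 ^ k : Nat) : Int) = 2 ^ k := by push_cast; rfl
  rw [hcast]
  set m : Nat := (c % 33554432).toNat with hm
  have hm0 : 0 ≤ c % 33554432 := Int.emod_nonneg c (by norm_num)
  have hmc : (m : Int) = c % 33554432 := Int.toNat_of_nonneg hm0
  have hdecomp : c = (m : Int) + c / 33554432 * 33554432 := by omega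
  have hne : ((2 : Int) ^ k) ≠ 0 := by positivity
  have hsplit : (33554432 : Int) = 2 ^ k * (2 ^ (24 - k) * 2) := by
    rw [show (2 : Int) ^ k * (2 ^ (24 - k) * 2) = 2 ^ (k + (24 - k) + 1) by
      rw [pow_succ, pow_add]; ring]
    have : k + (24 - k) + 1 = 25 := by omega
    rw [this]
    norm_num
  obtain ⟨t, ht2⟩ : ∃ t : Int, c / 2 ^ k = (m : Int) / 2 ^ k + t * 2 := by
    refine ⟨c / 33554432 * 2 ^ (24 - k), ?_⟩
    have hdecomp2 : c = (m : Int) + (c / 33554432 * 2 ^ (24 - k) * 2) * 2 ^ k := by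
      linear_combination hdecomp + (c / 33554432) * hsplit
    have h1 : ((m : Int) + (c / 33554432 * 2 ^ (24 - k) * 2) * 2 ^ k) / 2 ^ k
        = (m : Int) / 2 ^ k + c / 33554432 * 2 ^ (24 - k) * 2 := Int.add_mul_ediv_right _ _ hne
    conv_lhs => rw [hdecomp2]
    rw [h1]
  have hnd : ((m / 2 ^ k : Nat) : Int) = (m : Int) / 2 ^ k := by
    rw [Int.natCast_ediv]
    rfl
  have hce : c / 2 ^ k % 2 = ((m / 2 ^ k % 2 : Nat) : Int) := by
    rw [ht2, ← hnd]
    omega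
  rw [Nat.testBit_eq_decide_div_mod_eq, hce]
  rcases Nat.mod_two_eq_zero_or_one (m / 2 ^ k) with h | h <;> simp [h]

-- A's tuple is the (+1)-shifted list of set bits of the low 25 bits of c.
theorem bitmap_para_tupla_eq (c : Int) :
    bitmap_para_tupla c = (setBits 25 (c % 33554432).toNat).map (fun j : Nat => (j : Int) + 1) := by
  unfold bitmap_para_tupla
  rw [PySem.List.pyRange_one]
  rw [show ((25 : Int) - 0).toNat = 25 from rfl]
  rw [show (fun k : Nat => (0 : Int) + (k : Int)) = (fun k : Nat => (k : Int)) from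
    funext fun k => by ring]
  rw [List.filter_map, List.map_map]
  unfold setBits
  have hfc : ∀ (p : Int → Bool), (∀ x : Nat, x < 25 → p (x : Int) = (c % 33554432).toNat.testBit x) →
      List.filter (p ∘ (fun k : Nat => (k : Int))) (List.range 25) =
      List.filter ((c % 33554432).toNat.testBit) (List.range 25) := by
    intro p hp
    apply List.filter_congr
    intro x hx
    rw [List.mem_range] at hx
    simp only [Function.comp_apply]
    exact hp x hx
  rw [hfc _ (fun x hx => by
    rw [Int.toNat_natCast, Int.shiftRight_natCast_right]
    exact bit_read_eq c x hx)]
  rfl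

-- A's indexed all-scan is the successor chain on the list.
theorem all_scan_eq_chain (l : List Int) :
    ((PySem.List.pyRange 0 ((l.length : Int) - 1) 1).all
        (fun i => PySem.List.pyGetD l i 0 + 1 == PySem.List.pyGetD l (i + 1) 0)) =
      decide (List.IsChain (fun a b : Int => a + 1 = b) l) := by
  rw [Bool.eq_iff_iff]
  simp only [List.all_eq_true, beq_iff_eq, decide_eq_true_eq]
  rw [List.isChain_iff_getElem]
  constructor
  · intro hfa i hi
    have hx := hfa (i : Int) (by
      rw [PySem.List.mem_pyRange_one]
      omega)
    rw [PySem.List.pyGetD_natCast] at hx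
    rw [show ((i : Int) + 1) = ((i + 1 : Nat) : Int) by push_cast; ring] at hx
    rw [PySem.List.pyGetD_natCast] at hx
    rw [List.getD_eq_getElem _ _ (by omega), List.getD_eq_getElem _ _ (by omega)] at hx
    exact hx
  · intro hc x hx
    rw [PySem.List.mem_pyRange_one] at hx
    obtain ⟨k, rfl⟩ := Int.eq_ofNat_of_zero_le hx.1
    have hklt : k + 1 < l.length := by
      have := hx.2
      push_cast at this
      omega
    rw [PySem.List.pyGetD_natCast]
    rw [show ((k : Int) + 1) = ((k + 1 : Nat) : Int) by push_cast; ring]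
    rw [PySem.List.pyGetD_natCast]
    rw [List.getD_eq_getElem _ _ (by omega), List.getD_eq_getElem _ _ (by omega)]
    exact hc k hklt

-- Pointwise: A's keep-condition equals B's predicate.
theorem keep_eq (c : Int) :
    (!((PySem.List.pyRange 0 (((bitmap_para_tupla c).length : Int) - 1) 1).all
        (fun i => PySem.List.pyGetD (bitmap_para_tupla c) i 0 + 1 ==
          PySem.List.pyGetD (bitmap_para_tupla c) (i + 1) 0))) = nao_sequencial c := by
  rw [all_scan_eq_chain]
  unfold nao_sequencial
  rw [band_mask_eq]
  set m : Nat := (c % 33554432).toNat with hm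
  have hmlt : m < 2 ^ 25 := by
    have h1 : c % 33554432 < 33554432 := Int.emod_lt_of_pos c (by norm_num)
    have h0 : 0 ≤ c % 33554432 := Int.emod_nonneg c (by norm_num)
    omega
  have hchain : List.IsChain (fun a b : Int => a + 1 = b) (bitmap_para_tupla c) ↔
      stripTrailingZeros m &&& (stripTrailingZeros m + 1) = 0 := by
    have hstep : List.IsChain (fun a b : Nat => (a : Int) + 1 + 1 = (b : Int) + 1)
        (setBits 25 m) ↔ List.IsChain (fun a b : Nat => a + 1 = b) (setBits 25 m) := by
      constructor <;> intro h <;> refine h.imp ?_ <;> intro a b hab <;> omega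
    rw [bitmap_para_tupla_eq, List.isChain_map, ← hm]
    exact hstep.trans (chain_setBits_iff hmlt)
  by_cases hs : List.IsChain (fun a b : Int => a + 1 = b) (bitmap_para_tupla c)
  · have := hchain.mp hs
    simp [hs, this]
  · have : ¬ (stripTrailingZeros m &&& (stripTrailingZeros m + 1) = 0) := fun h => hs (hchain.mpr h)
    simp [hs, this]

-- ===== VERDICT (by name: the statement is the Claim_ definition above) =====
theorem filtro_estatistico_spec : Claim_equal_filtro_estatistico := by
  intro combinacoes _
  unfold Spec_filtro_estatistico filtro_estatistico filtro_estatistico_alt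
  have hfun : (fun (filtradas : List Int) (c : Int) =>
      let nums := bitmap_para_tupla c
      let sequencial := (PySem.List.pyRange 0 ((nums.length : Int) - 1) 1).all
          (fun i => PySem.List.pyGetD nums i 0 + 1 == PySem.List.pyGetD nums (i + 1) 0)
      if !sequencial then filtradas ++ [c] else filtradas) =
      (fun (filtradas : List Int) (c : Int) =>
        if nao_sequencial c then filtradas ++ [id c] else filtradas) := by
    funext filtradas c
    show (if !_ then _ else _) = _
    rw [keep_eq c]
    rfl
  rw [hfun, PySem.List.foldl_append_if nao_sequencial id combinacoes []]
  simp
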